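-- pv_equiv track=rewrite | github.com/antonin-lfv/CryptoPlatform | utils.py | get_current_quest_step
-- ===== SOURCE A (Python) =====
-- NFTs_bought_steps = [1] + [i for i in range(5, 101, 5)] + [i for i in range(105, 306, 20)]
--
-- NFTs_sold_steps = [1] + [i for i in range(5, 101, 5)] + [i for i in range(105, 306, 20)]
--
-- NFTs_bid_steps = [1] + [i for i in range(5, 101, 5)] + [i for i in range(105, 306, 20)]
--
-- Servers_bought_steps = [1] + [i for i in range(5, 200, 15)] + [i for i in range(200, 740, 30)]
--
-- def get_current_quest_step(nft_bougth, nft_sold, nft_bid, servers_bought):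
--     """
--     Return the current step of the quest (index of the list of steps)
--     /!\ each of the four quests categories has 32 steps
--     To go to the next step, the user must have completed the current step and validate a button to get the reward
--
--     To get the number of BTC to be rewarded, the index of the step is used (0.05 * (index + 1)  of the step BTC)
--     """
--     index_nft_bougth = 31
--     index_nft_sold = 31
--     index_nft_bid = 31
--     index_servers_bought = 31
--     for i, step in enumerate(NFTs_bought_steps):
--         if nft_bougth < step:
--             index_nft_bougth = i - 1
--             break
--     for i, step in enumerate(NFTs_sold_steps):
--         if nft_sold < step:
--             index_nft_sold = i - 1
--             break
--     for i, step in enumerate(NFTs_bid_steps):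
--         if nft_bid < step:
--             index_nft_bid = i - 1
--             break
--     for i, step in enumerate(Servers_bought_steps):
--         if servers_bought < step:
--             index_servers_bought = i - 1
--             break
--
--     return index_nft_bougth, index_nft_sold, index_nft_bid, index_servers_bought
-- ===== SOURCE B (Python) =====
-- def _nft_index(v):
--     # closed-form index into [1, 5,10,...,100, 105,125,...,305]
--     if v < 1:
--         return -1
--     if v < 5:
--         return 0
--     if v < 105:
--         return v // 5
--     return min(31, 21 + (v - 105) // 20)
--
--
-- def _server_index(v):
--     # closed-form index into [1, 5,20,...,185, 200,230,...,710]
--     if v < 1: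
--         return -1
--     if v < 5:
--         return 0
--     if v < 200:
--         return 1 + (v - 5) // 15
--     return min(31, 14 + (v - 200) // 30)
--
--
-- def get_current_quest_step(nft_bougth, nft_sold, nft_bid, servers_bought):
--     return (_nft_index(nft_bougth), _nft_index(nft_sold),
--             _nft_index(nft_bid), _server_index(servers_bought))
-- ===== Notes on version B (the rewrite author's own statement) =====
-- stated objective: alternative
-- what changed: Replaces the four enumerate-with-break linear scans over the step lists by closed-form arithmetic: each index is computed directly with floor divisions over the three regular segments of each list (1, an arithmetic progression, a second progression), clamped at 31.
import Mathlib
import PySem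

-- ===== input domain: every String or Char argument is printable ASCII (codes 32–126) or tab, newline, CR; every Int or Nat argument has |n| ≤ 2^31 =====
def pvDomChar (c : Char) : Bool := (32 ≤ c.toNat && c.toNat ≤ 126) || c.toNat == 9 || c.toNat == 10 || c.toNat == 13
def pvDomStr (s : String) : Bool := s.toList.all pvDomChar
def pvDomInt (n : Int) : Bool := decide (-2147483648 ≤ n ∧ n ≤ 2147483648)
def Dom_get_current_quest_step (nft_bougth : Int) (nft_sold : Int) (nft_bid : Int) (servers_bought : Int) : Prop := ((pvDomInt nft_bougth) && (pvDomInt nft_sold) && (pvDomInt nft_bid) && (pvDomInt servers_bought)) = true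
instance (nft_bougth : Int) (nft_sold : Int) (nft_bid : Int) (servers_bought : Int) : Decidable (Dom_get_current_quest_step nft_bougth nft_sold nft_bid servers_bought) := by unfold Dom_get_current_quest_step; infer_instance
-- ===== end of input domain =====

-- B replaces A's four enumerate-and-break linear scans over the step lists by
-- closed-form arithmetic (floor divisions over the three regular segments of each
-- list); objective: alternative (different algorithm, same exact values).

-- ===== PORT A =====
def NFTs_bought_steps : List Int :=
  [1] ++ PySem.List.pyRange 5 101 5 ++ PySem.List.pyRange 105 306 20
def NFTs_sold_steps : List Int :=
  [1] ++ PySem.List.pyRange 5 101 5 ++ PySem.List.pyRange 105 306 20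
def NFTs_bid_steps : List Int :=
  [1] ++ PySem.List.pyRange 5 101 5 ++ PySem.List.pyRange 105 306 20
def Servers_bought_steps : List Int :=
  [1] ++ PySem.List.pyRange 5 200 15 ++ PySem.List.pyRange 200 740 30

-- the enumerate loop with break: index i runs along the list, default 31 if no break
def pvScan (v : Int) (i : Int) : List Int → Int
  | [] => 31
  | step :: rest => if v < step then i - 1 else pvScan v (i + 1) rest

def get_current_quest_step (nft_bougth : Int) (nft_sold : Int) (nft_bid : Int) (servers_bought : Int) : Int × Int × Int × Int :=
  (pvScan nft_bougth 0 NFTs_bought_steps,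
   pvScan nft_sold 0 NFTs_sold_steps,
   pvScan nft_bid 0 NFTs_bid_steps,
   pvScan servers_bought 0 Servers_bought_steps)

-- ===== PORT B =====
def pvNftIndex (v : Int) : Int :=
  if v < 1 then -1
  else if v < 5 then 0
  else if v < 105 then PySem.Int.floordiv v 5
  else min 31 (21 + PySem.Int.floordiv (v - 105) 20)

def pvServerIndex (v : Int) : Int :=
  if v < 1 then -1
  else if v < 5 then 0
  else if v < 200 then 1 + PySem.Int.floordiv (v - 5) 15
  else min 31 (14 + PySem.Int.floordiv (v - 200) 30)

def get_current_quest_step_alt (nft_bougth : Int) (nft_sold : Int) (nft_bid : Int) (servers_bought : Int) : Int × Int × Int × Int :=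
  (pvNftIndex nft_bougth, pvNftIndex nft_sold, pvNftIndex nft_bid, pvServerIndex servers_bought)

-- ===== PRECONDITION & SPEC =====
def Spec_get_current_quest_step (nft_bougth : Int) (nft_sold : Int) (nft_bid : Int) (servers_bought : Int) (out : Int × Int × Int × Int) : Prop := out = get_current_quest_step_alt nft_bougth nft_sold nft_bid servers_bought
instance (nft_bougth : Int) (nft_sold : Int) (nft_bid : Int) (servers_bought : Int) (out : Int × Int × Int × Int) : Decidable (Spec_get_current_quest_step nft_bougth nft_sold nft_bid servers_bought out) := by unfold Spec_get_current_quest_step; infer_instance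

-- ===== CLAIM (what is proved, stated in full; the proofs are below) =====
def Claim_equal_get_current_quest_step : Prop := ∀ (nft_bougth : Int) (nft_sold : Int) (nft_bid : Int) (servers_bought : Int), Dom_get_current_quest_step nft_bougth nft_sold nft_bid servers_bought → Spec_get_current_quest_step nft_bougth nft_sold nft_bid servers_bought (get_current_quest_step nft_bougth nft_sold nft_bid servers_bought)

-- ===== LEMMAS AND PROOFS =====
lemma nft_steps_eq : NFTs_bought_steps = [1,5,10,15,20,25,30,35,40,45,50,55,60,65,70,75,80,85,90,95,100,105,125,145,165,185,205,225,245,265,285,305] := by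
  decide

lemma srv_steps_eq : Servers_bought_steps = [1,5,20,35,50,65,80,95,110,125,140,155,170,185,200,230,260,290,320,350,380,410,440,470,500,530,560,590,620,650,680,710] := by
  decide

lemma pvfd5 (a : Int) : PySem.Int.floordiv a 5 = a / 5 := PySem.Int.floordiv_eq_ediv_of_pos (by norm_num)
lemma pvfd20 (a : Int) : PySem.Int.floordiv a 20 = a / 20 := PySem.Int.floordiv_eq_ediv_of_pos (by norm_num)
lemma pvfd15 (a : Int) : PySem.Int.floordiv a 15 = a / 15 := PySem.Int.floordiv_eq_ediv_of_pos (by norm_num)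
lemma pvfd30 (a : Int) : PySem.Int.floordiv a 30 = a / 30 := PySem.Int.floordiv_eq_ediv_of_pos (by norm_num)

lemma scan_nft_lit (v : Int) : pvScan v 0 [1,5,10,15,20,25,30,35,40,45,50,55,60,65,70,75,80,85,90,95,100,105,125,145,165,185,205,225,245,265,285,305] = pvNftIndex v := by
  by_cases h0 : v < 1
  · simp only [pvScan, if_pos h0, pvNftIndex]; omega
  by_cases h1 : v < 5
  · simp only [pvScan, if_neg h0, if_pos h1, pvNftIndex]; omega
  by_cases h2 : v < 10
  · simp only [pvScan, if_neg h0, if_neg h1, if_pos h2, pvNftIndex, pvfd5, pvfd20]; omega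
  by_cases h3 : v < 15
  · simp only [pvScan, if_neg h0, if_neg h1, if_neg h2, if_pos h3, pvNftIndex, pvfd5, pvfd20]; omega
  by_cases h4 : v < 20
  · simp only [pvScan, if_neg h0, if_neg h1, if_neg h2, if_neg h3, if_pos h4, pvNftIndex, pvfd5, pvfd20]; omega
  by_cases h5 : v < 25
  · simp only [pvScan, if_neg h0, if_neg h1, if_neg h2, if_neg h3, if_neg h4, if_pos h5, pvNftIndex, pvfd5, pvfd20]; omega
  by_cases h6 : v < 30
  · simp only [pvScan, if_neg h0, if_neg h1, if_neg h2, if_neg h3, if_neg h4, if_neg h5, if_pos h6, pvNftIndex, pvfd5, pvfd20]; omega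
  by_cases h7 : v < 35
  · simp only [pvScan, if_neg h0, if_neg h1, if_neg h2, if_neg h3, if_neg h4, if_neg h5, if_neg h6, if_pos h7, pvNftIndex, pvfd5, pvfd20]; omega
  by_cases h8 : v < 40
  · simp only [pvScan, if_neg h0, if_neg h1, if_neg h2, if_neg h3, if_neg h4, if_neg h5, if_neg h6, if_neg h7, if_pos h8, pvNftIndex, pvfd5, pvfd20]; omega
  by_cases h9 : v < 45
  · simp only [pvScan, if_neg h0, if_neg h1, if_neg h2, if_neg h3, if_neg h4, if_neg h5, if_neg h6, if_neg h7, if_neg h8, if_pos h9, pvNftIndex, pvfd5, pvfd20]; omega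
  by_cases h10 : v < 50
  · simp only [pvScan, if_neg h0, if_neg h1, if_neg h2, if_neg h3, if_neg h4, if_neg h5, if_neg h6, if_neg h7, if_neg h8, if_neg h9, if_pos h10, pvNftIndex, pvfd5, pvfd20]; omega
  by_cases h11 : v < 55
  · simp only [pvScan, if_neg h0, if_neg h1, if_neg h2, if_neg h3, if_neg h4, if_neg h5, if_neg h6, if_neg h7, if_neg h8, if_neg h9, if_neg h10, if_pos h11, pvNftIndex, pvfd5, pvfd20]; omega
  by_cases h12 : v < 60
  · simp only [pvScan, if_neg h0, if_neg h1, if_neg h2, if_neg h3, if_neg h4, if_neg h5, if_neg h6, if_neg h7, if_neg h8, if_neg h9, if_neg h10, if_neg h11, if_pos h12, pvNftIndex, pvfd5, pvfd20]; omega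
  by_cases h13 : v < 65
  · simp only [pvScan, if_neg h0, if_neg h1, if_neg h2, if_neg h3, if_neg h4, if_neg h5, if_neg h6, if_neg h7, if_neg h8, if_neg h9, if_neg h10, if_neg h11, if_neg h12, if_pos h13, pvNftIndex, pvfd5, pvfd20]; omega
  by_cases h14 : v < 70
  · simp only [pvScan, if_neg h0, if_neg h1, if_neg h2, if_neg h3, if_neg h4, if_neg h5, if_neg h6, if_neg h7, if_neg h8, if_neg h9, if_neg h10, if_neg h11, if_neg h12, if_neg h13, if_pos h14, pvNftIndex, pvfd5, pvfd20]; omega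
  by_cases h15 : v < 75
  · simp only [pvScan, if_neg h0, if_neg h1, if_neg h2, if_neg h3, if_neg h4, if_neg h5, if_neg h6, if_neg h7, if_neg h8, if_neg h9, if_neg h10, if_neg h11, if_neg h12, if_neg h13, if_neg h14, if_pos h15, pvNftIndex, pvfd5, pvfd20]; omega
  by_cases h16 : v < 80
  · simp only [pvScan, if_neg h0, if_neg h1, if_neg h2, if_neg h3, if_neg h4, if_neg h5, if_neg h6, if_neg h7, if_neg h8, if_neg h9, if_neg h10, if_neg h11, if_neg h12, if_neg h13, if_neg h14, if_neg h15, if_pos h16, pvNftIndex, pvfd5, pvfd20]; omega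
  by_cases h17 : v < 85
  · simp only [pvScan, if_neg h0, if_neg h1, if_neg h2, if_neg h3, if_neg h4, if_neg h5, if_neg h6, if_neg h7, if_neg h8, if_neg h9, if_neg h10, if_neg h11, if_neg h12, if_neg h13, if_neg h14, if_neg h15, if_neg h16, if_pos h17, pvNftIndex, pvfd5, pvfd20]; omega
  by_cases h18 : v < 90
  · simp only [pvScan, if_neg h0, if_neg h1, if_neg h2, if_neg h3, if_neg h4, if_neg h5, if_neg h6, if_neg h7, if_neg h8, if_neg h9, if_neg h10, if_neg h11, if_neg h12, if_neg h13, if_neg h14, if_neg h15, if_neg h16, if_neg h17, if_pos h18, pvNftIndex, pvfd5, pvfd20]; omega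
  by_cases h19 : v < 95
  · simp only [pvScan, if_neg h0, if_neg h1, if_neg h2, if_neg h3, if_neg h4, if_neg h5, if_neg h6, if_neg h7, if_neg h8, if_neg h9, if_neg h10, if_neg h11, if_neg h12, if_neg h13, if_neg h14, if_neg h15, if_neg h16, if_neg h17, if_neg h18, if_pos h19, pvNftIndex, pvfd5, pvfd20]; omega
  by_cases h20 : v < 100
  · simp only [pvScan, if_neg h0, if_neg h1, if_neg h2, if_neg h3, if_neg h4, if_neg h5, if_neg h6, if_neg h7, if_neg h8, if_neg h9, if_neg h10, if_neg h11, if_neg h12, if_neg h13, if_neg h14, if_neg h15, if_neg h16, if_neg h17, if_neg h18, if_neg h19, if_pos h20, pvNftIndex, pvfd5, pvfd20]; omega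
  by_cases h21 : v < 105
  · simp only [pvScan, if_neg h0, if_neg h1, if_neg h2, if_neg h3, if_neg h4, if_neg h5, if_neg h6, if_neg h7, if_neg h8, if_neg h9, if_neg h10, if_neg h11, if_neg h12, if_neg h13, if_neg h14, if_neg h15, if_neg h16, if_neg h17, if_neg h18, if_neg h19, if_neg h20, if_pos h21, pvNftIndex, pvfd5, pvfd20]; omega
  by_cases h22 : v < 125
  · simp only [pvScan, if_neg h0, if_neg h1, if_neg h2, if_neg h3, if_neg h4, if_neg h5, if_neg h6, if_neg h7, if_neg h8, if_neg h9, if_neg h10, if_neg h11, if_neg h12, if_neg h13, if_neg h14, if_neg h15, if_neg h16, if_neg h17, if_neg h18, if_neg h19, if_neg h20, if_neg h21, if_pos h22, pvNftIndex, pvfd5, pvfd20]; omega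
  by_cases h23 : v < 145
  · simp only [pvScan, if_neg h0, if_neg h1, if_neg h2, if_neg h3, if_neg h4, if_neg h5, if_neg h6, if_neg h7, if_neg h8, if_neg h9, if_neg h10, if_neg h11, if_neg h12, if_neg h13, if_neg h14, if_neg h15, if_neg h16, if_neg h17, if_neg h18, if_neg h19, if_neg h20, if_neg h21, if_neg h22, if_pos h23, pvNftIndex, pvfd5, pvfd20]; omega
  by_cases h24 : v < 165
  · simp only [pvScan, if_neg h0, if_neg h1, if_neg h2, if_neg h3, if_neg h4, if_neg h5, if_neg h6, if_neg h7, if_neg h8, if_neg h9, if_neg h10, if_neg h11, if_neg h12, if_neg h13, if_neg h14, if_neg h15, if_neg h16, if_neg h17, if_neg h18, if_neg h19, if_neg h20, if_neg h21, if_neg h22, if_neg h23, if_pos h24, pvNftIndex, pvfd5, pvfd20]; omega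
  by_cases h25 : v < 185
  · simp only [pvScan, if_neg h0, if_neg h1, if_neg h2, if_neg h3, if_neg h4, if_neg h5, if_neg h6, if_neg h7, if_neg h8, if_neg h9, if_neg h10, if_neg h11, if_neg h12, if_neg h13, if_neg h14, if_neg h15, if_neg h16, if_neg h17, if_neg h18, if_neg h19, if_neg h20, if_neg h21, if_neg h22, if_neg h23, if_neg h24, if_pos h25, pvNftIndex, pvfd5, pvfd20]; omega
  by_cases h26 : v < 205
  · simp only [pvScan, if_neg h0, if_neg h1, if_neg h2, if_neg h3, if_neg h4, if_neg h5, if_neg h6, if_neg h7, if_neg h8, if_neg h9, if_neg h10, if_neg h11, if_neg h12, if_neg h13, if_neg h14, if_neg h15, if_neg h16, if_neg h17, if_neg h18, if_neg h19, if_neg h20, if_neg h21, if_neg h22, if_neg h23, if_neg h24, if_neg h25, if_pos h26, pvNftIndex, pvfd5, pvfd20]; omega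
  by_cases h27 : v < 225
  · simp only [pvScan, if_neg h0, if_neg h1, if_neg h2, if_neg h3, if_neg h4, if_neg h5, if_neg h6, if_neg h7, if_neg h8, if_neg h9, if_neg h10, if_neg h11, if_neg h12, if_neg h13, if_neg h14, if_neg h15, if_neg h16, if_neg h17, if_neg h18, if_neg h19, if_neg h20, if_neg h21, if_neg h22, if_neg h23, if_neg h24, if_neg h25, if_neg h26, if_pos h27, pvNftIndex, pvfd5, pvfd20]; omega
  by_cases h28 : v < 245
  · simp only [pvScan, if_neg h0, if_neg h1, if_neg h2, if_neg h3, if_neg h4, if_neg h5, if_neg h6, if_neg h7, if_neg h8, if_neg h9, if_neg h10, if_neg h11, if_neg h12, if_neg h13, if_neg h14, if_neg h15, if_neg h16, if_neg h17, if_neg h18, if_neg h19, if_neg h20, if_neg h21, if_neg h22, if_neg h23, if_neg h24, if_neg h25, if_neg h26, if_neg h27, if_pos h28, pvNftIndex, pvfd5, pvfd20]; omega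
  by_cases h29 : v < 265
  · simp only [pvScan, if_neg h0, if_neg h1, if_neg h2, if_neg h3, if_neg h4, if_neg h5, if_neg h6, if_neg h7, if_neg h8, if_neg h9, if_neg h10, if_neg h11, if_neg h12, if_neg h13, if_neg h14, if_neg h15, if_neg h16, if_neg h17, if_neg h18, if_neg h19, if_neg h20, if_neg h21, if_neg h22, if_neg h23, if_neg h24, if_neg h25, if_neg h26, if_neg h27, if_neg h28, if_pos h29, pvNftIndex, pvfd5, pvfd20]; omega
  by_cases h30 : v < 285
  · simp only [pvScan, if_neg h0, if_neg h1, if_neg h2, if_neg h3, if_neg h4, if_neg h5, if_neg h6, if_neg h7, if_neg h8, if_neg h9, if_neg h10, if_neg h11, if_neg h12, if_neg h13, if_neg h14, if_neg h15, if_neg h16, if_neg h17, if_neg h18, if_neg h19, if_neg h20, if_neg h21, if_neg h22, if_neg h23, if_neg h24, if_neg h25, if_neg h26, if_neg h27, if_neg h28, if_neg h29, if_pos h30, pvNftIndex, pvfd5, pvfd20]; omega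
  by_cases h31 : v < 305
  · simp only [pvScan, if_neg h0, if_neg h1, if_neg h2, if_neg h3, if_neg h4, if_neg h5, if_neg h6, if_neg h7, if_neg h8, if_neg h9, if_neg h10, if_neg h11, if_neg h12, if_neg h13, if_neg h14, if_neg h15, if_neg h16, if_neg h17, if_neg h18, if_neg h19, if_neg h20, if_neg h21, if_neg h22, if_neg h23, if_neg h24, if_neg h25, if_neg h26, if_neg h27, if_neg h28, if_neg h29, if_neg h30, if_pos h31, pvNftIndex, pvfd5, pvfd20]; omega
  simp only [pvScan, if_neg h0, if_neg h1, if_neg h2, if_neg h3, if_neg h4, if_neg h5, if_neg h6, if_neg h7, if_neg h8, if_neg h9, if_neg h10, if_neg h11, if_neg h12, if_neg h13, if_neg h14, if_neg h15, if_neg h16, if_neg h17, if_neg h18, if_neg h19, if_neg h20, if_neg h21, if_neg h22, if_neg h23, if_neg h24, if_neg h25, if_neg h26, if_neg h27, if_neg h28, if_neg h29, if_neg h30, if_neg h31, pvNftIndex, pvfd5, pvfd20]; omega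

lemma scan_srv_lit (v : Int) : pvScan v 0 [1,5,20,35,50,65,80,95,110,125,140,155,170,185,200,230,260,290,320,350,380,410,440,470,500,530,560,590,620,650,680,710] = pvServerIndex v := by
  by_cases h0 : v < 1
  · simp only [pvScan, if_pos h0, pvServerIndex]; omega
  by_cases h1 : v < 5
  · simp only [pvScan, if_neg h0, if_pos h1, pvServerIndex]; omega
  by_cases h2 : v < 20
  · simp only [pvScan, if_neg h0, if_neg h1, if_pos h2, pvServerIndex, pvfd15, pvfd30]; omega
  by_cases h3 : v < 35
  · simp only [pvScan, if_neg h0, if_neg h1, if_neg h2, if_pos h3, pvServerIndex, pvfd15, pvfd30]; omega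
  by_cases h4 : v < 50
  · simp only [pvScan, if_neg h0, if_neg h1, if_neg h2, if_neg h3, if_pos h4, pvServerIndex, pvfd15, pvfd30]; omega
  by_cases h5 : v < 65
  · simp only [pvScan, if_neg h0, if_neg h1, if_neg h2, if_neg h3, if_neg h4, if_pos h5, pvServerIndex, pvfd15, pvfd30]; omega
  by_cases h6 : v < 80
  · simp only [pvScan, if_neg h0, if_neg h1, if_neg h2, if_neg h3, if_neg h4, if_neg h5, if_pos h6, pvServerIndex, pvfd15, pvfd30]; omega
  by_cases h7 : v < 95
  · simp only [pvScan, if_neg h0, if_neg h1, if_neg h2, if_neg h3, if_neg h4, if_neg h5, if_neg h6, if_pos h7, pvServerIndex, pvfd15, pvfd30]; omega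
  by_cases h8 : v < 110
  · simp only [pvScan, if_neg h0, if_neg h1, if_neg h2, if_neg h3, if_neg h4, if_neg h5, if_neg h6, if_neg h7, if_pos h8, pvServerIndex, pvfd15, pvfd30]; omega
  by_cases h9 : v < 125
  · simp only [pvScan, if_neg h0, if_neg h1, if_neg h2, if_neg h3, if_neg h4, if_neg h5, if_neg h6, if_neg h7, if_neg h8, if_pos h9, pvServerIndex, pvfd15, pvfd30]; omega
  by_cases h10 : v < 140
  · simp only [pvScan, if_neg h0, if_neg h1, if_neg h2, if_neg h3, if_neg h4, if_neg h5, if_neg h6, if_neg h7, if_neg h8, if_neg h9, if_pos h10, pvServerIndex, pvfd15, pvfd30]; omega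
  by_cases h11 : v < 155
  · simp only [pvScan, if_neg h0, if_neg h1, if_neg h2, if_neg h3, if_neg h4, if_neg h5, if_neg h6, if_neg h7, if_neg h8, if_neg h9, if_neg h10, if_pos h11, pvServerIndex, pvfd15, pvfd30]; omega
  by_cases h12 : v < 170
  · simp only [pvScan, if_neg h0, if_neg h1, if_neg h2, if_neg h3, if_neg h4, if_neg h5, if_neg h6, if_neg h7, if_neg h8, if_neg h9, if_neg h10, if_neg h11, if_pos h12, pvServerIndex, pvfd15, pvfd30]; omega
  by_cases h13 : v < 185
  · simp only [pvScan, if_neg h0, if_neg h1, if_neg h2, if_neg h3, if_neg h4, if_neg h5, if_neg h6, if_neg h7, if_neg h8, if_neg h9, if_neg h10, if_neg h11, if_neg h12, if_pos h13, pvServerIndex, pvfd15, pvfd30]; omega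
  by_cases h14 : v < 200
  · simp only [pvScan, if_neg h0, if_neg h1, if_neg h2, if_neg h3, if_neg h4, if_neg h5, if_neg h6, if_neg h7, if_neg h8, if_neg h9, if_neg h10, if_neg h11, if_neg h12, if_neg h13, if_pos h14, pvServerIndex, pvfd15, pvfd30]; omega
  by_cases h15 : v < 230
  · simp only [pvScan, if_neg h0, if_neg h1, if_neg h2, if_neg h3, if_neg h4, if_neg h5, if_neg h6, if_neg h7, if_neg h8, if_neg h9, if_neg h10, if_neg h11, if_neg h12, if_neg h13, if_neg h14, if_pos h15, pvServerIndex, pvfd15, pvfd30]; omega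
  by_cases h16 : v < 260
  · simp only [pvScan, if_neg h0, if_neg h1, if_neg h2, if_neg h3, if_neg h4, if_neg h5, if_neg h6, if_neg h7, if_neg h8, if_neg h9, if_neg h10, if_neg h11, if_neg h12, if_neg h13, if_neg h14, if_neg h15, if_pos h16, pvServerIndex, pvfd15, pvfd30]; omega
  by_cases h17 : v < 290
  · simp only [pvScan, if_neg h0, if_neg h1, if_neg h2, if_neg h3, if_neg h4, if_neg h5, if_neg h6, if_neg h7, if_neg h8, if_neg h9, if_neg h10, if_neg h11, if_neg h12, if_neg h13, if_neg h14, if_neg h15, if_neg h16, if_pos h17, pvServerIndex, pvfd15, pvfd30]; omega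
  by_cases h18 : v < 320
  · simp only [pvScan, if_neg h0, if_neg h1, if_neg h2, if_neg h3, if_neg h4, if_neg h5, if_neg h6, if_neg h7, if_neg h8, if_neg h9, if_neg h10, if_neg h11, if_neg h12, if_neg h13, if_neg h14, if_neg h15, if_neg h16, if_neg h17, if_pos h18, pvServerIndex, pvfd15, pvfd30]; omega
  by_cases h19 : v < 350
  · simp only [pvScan, if_neg h0, if_neg h1, if_neg h2, if_neg h3, if_neg h4, if_neg h5, if_neg h6, if_neg h7, if_neg h8, if_neg h9, if_neg h10, if_neg h11, if_neg h12, if_neg h13, if_neg h14, if_neg h15, if_neg h16, if_neg h17, if_neg h18, if_pos h19, pvServerIndex, pvfd15, pvfd30]; omega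
  by_cases h20 : v < 380
  · simp only [pvScan, if_neg h0, if_neg h1, if_neg h2, if_neg h3, if_neg h4, if_neg h5, if_neg h6, if_neg h7, if_neg h8, if_neg h9, if_neg h10, if_neg h11, if_neg h12, if_neg h13, if_neg h14, if_neg h15, if_neg h16, if_neg h17, if_neg h18, if_neg h19, if_pos h20, pvServerIndex, pvfd15, pvfd30]; omega
  by_cases h21 : v < 410
  · simp only [pvScan, if_neg h0, if_neg h1, if_neg h2, if_neg h3, if_neg h4, if_neg h5, if_neg h6, if_neg h7, if_neg h8, if_neg h9, if_neg h10, if_neg h11, if_neg h12, if_neg h13, if_neg h14, if_neg h15, if_neg h16, if_neg h17, if_neg h18, if_neg h19, if_neg h20, if_pos h21, pvServerIndex, pvfd15, pvfd30]; omega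
  by_cases h22 : v < 440
  · simp only [pvScan, if_neg h0, if_neg h1, if_neg h2, if_neg h3, if_neg h4, if_neg h5, if_neg h6, if_neg h7, if_neg h8, if_neg h9, if_neg h10, if_neg h11, if_neg h12, if_neg h13, if_neg h14, if_neg h15, if_neg h16, if_neg h17, if_neg h18, if_neg h19, if_neg h20, if_neg h21, if_pos h22, pvServerIndex, pvfd15, pvfd30]; omega
  by_cases h23 : v < 470
  · simp only [pvScan, if_neg h0, if_neg h1, if_neg h2, if_neg h3, if_neg h4, if_neg h5, if_neg h6, if_neg h7, if_neg h8, if_neg h9, if_neg h10, if_neg h11, if_neg h12, if_neg h13, if_neg h14, if_neg h15, if_neg h16, if_neg h17, if_neg h18, if_neg h19, if_neg h20, if_neg h21, if_neg h22, if_pos h23, pvServerIndex, pvfd15, pvfd30]; omega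
  by_cases h24 : v < 500
  · simp only [pvScan, if_neg h0, if_neg h1, if_neg h2, if_neg h3, if_neg h4, if_neg h5, if_neg h6, if_neg h7, if_neg h8, if_neg h9, if_neg h10, if_neg h11, if_neg h12, if_neg h13, if_neg h14, if_neg h15, if_neg h16, if_neg h17, if_neg h18, if_neg h19, if_neg h20, if_neg h21, if_neg h22, if_neg h23, if_pos h24, pvServerIndex, pvfd15, pvfd30]; omega
  by_cases h25 : v < 530
  · simp only [pvScan, if_neg h0, if_neg h1, if_neg h2, if_neg h3, if_neg h4, if_neg h5, if_neg h6, if_neg h7, if_neg h8, if_neg h9, if_neg h10, if_neg h11, if_neg h12, if_neg h13, if_neg h14, if_neg h15, if_neg h16, if_neg h17, if_neg h18, if_neg h19, if_neg h20, if_neg h21, if_neg h22, if_neg h23, if_neg h24, if_pos h25, pvServerIndex, pvfd15, pvfd30]; omega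
  by_cases h26 : v < 560
  · simp only [pvScan, if_neg h0, if_neg h1, if_neg h2, if_neg h3, if_neg h4, if_neg h5, if_neg h6, if_neg h7, if_neg h8, if_neg h9, if_neg h10, if_neg h11, if_neg h12, if_neg h13, if_neg h14, if_neg h15, if_neg h16, if_neg h17, if_neg h18, if_neg h19, if_neg h20, if_neg h21, if_neg h22, if_neg h23, if_neg h24, if_neg h25, if_pos h26, pvServerIndex, pvfd15, pvfd30]; omega
  by_cases h27 : v < 590
  · simp only [pvScan, if_neg h0, if_neg h1, if_neg h2, if_neg h3, if_neg h4, if_neg h5, if_neg h6, if_neg h7, if_neg h8, if_neg h9, if_neg h10, if_neg h11, if_neg h12, if_neg h13, if_neg h14, if_neg h15, if_neg h16, if_neg h17, if_neg h18, if_neg h19, if_neg h20, if_neg h21, if_neg h22, if_neg h23, if_neg h24, if_neg h25, if_neg h26, if_pos h27, pvServerIndex, pvfd15, pvfd30]; omega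
  by_cases h28 : v < 620
  · simp only [pvScan, if_neg h0, if_neg h1, if_neg h2, if_neg h3, if_neg h4, if_neg h5, if_neg h6, if_neg h7, if_neg h8, if_neg h9, if_neg h10, if_neg h11, if_neg h12, if_neg h13, if_neg h14, if_neg h15, if_neg h16, if_neg h17, if_neg h18, if_neg h19, if_neg h20, if_neg h21, if_neg h22, if_neg h23, if_neg h24, if_neg h25, if_neg h26, if_neg h27, if_pos h28, pvServerIndex, pvfd15, pvfd30]; omega
  by_cases h29 : v < 650
  · simp only [pvScan, if_neg h0, if_neg h1, if_neg h2, if_neg h3, if_neg h4, if_neg h5, if_neg h6, if_neg h7, if_neg h8, if_neg h9, if_neg h10, if_neg h11, if_neg h12, if_neg h13, if_neg h14, if_neg h15, if_neg h16, if_neg h17, if_neg h18, if_neg h19, if_neg h20, if_neg h21, if_neg h22, if_neg h23, if_neg h24, if_neg h25, if_neg h26, if_neg h27, if_neg h28, if_pos h29, pvServerIndex, pvfd15, pvfd30]; omega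
  by_cases h30 : v < 680
  · simp only [pvScan, if_neg h0, if_neg h1, if_neg h2, if_neg h3, if_neg h4, if_neg h5, if_neg h6, if_neg h7, if_neg h8, if_neg h9, if_neg h10, if_neg h11, if_neg h12, if_neg h13, if_neg h14, if_neg h15, if_neg h16, if_neg h17, if_neg h18, if_neg h19, if_neg h20, if_neg h21, if_neg h22, if_neg h23, if_neg h24, if_neg h25, if_neg h26, if_neg h27, if_neg h28, if_neg h29, if_pos h30, pvServerIndex, pvfd15, pvfd30]; omega
  by_cases h31 : v < 710
  · simp only [pvScan, if_neg h0, if_neg h1, if_neg h2, if_neg h3, if_neg h4, if_neg h5, if_neg h6, if_neg h7, if_neg h8, if_neg h9, if_neg h10, if_neg h11, if_neg h12, if_neg h13, if_neg h14, if_neg h15, if_neg h16, if_neg h17, if_neg h18, if_neg h19, if_neg h20, if_neg h21, if_neg h22, if_neg h23, if_neg h24, if_neg h25, if_neg h26, if_neg h27, if_neg h28, if_neg h29, if_neg h30, if_pos h31, pvServerIndex, pvfd15, pvfd30]; omega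
  simp only [pvScan, if_neg h0, if_neg h1, if_neg h2, if_neg h3, if_neg h4, if_neg h5, if_neg h6, if_neg h7, if_neg h8, if_neg h9, if_neg h10, if_neg h11, if_neg h12, if_neg h13, if_neg h14, if_neg h15, if_neg h16, if_neg h17, if_neg h18, if_neg h19, if_neg h20, if_neg h21, if_neg h22, if_neg h23, if_neg h24, if_neg h25, if_neg h26, if_neg h27, if_neg h28, if_neg h29, if_neg h30, if_neg h31, pvServerIndex, pvfd15, pvfd30]; omega

lemma scan_nft (v : Int) : pvScan v 0 NFTs_bought_steps = pvNftIndex v := by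
  rw [nft_steps_eq]; exact scan_nft_lit v

lemma scan_srv (v : Int) : pvScan v 0 Servers_bought_steps = pvServerIndex v := by
  rw [srv_steps_eq]; exact scan_srv_lit v

-- ===== VERDICT (by name: the statement is the Claim_ definition above) =====
theorem get_current_quest_step_spec : Claim_equal_get_current_quest_step := by
  intro a b c d _
  unfold Spec_get_current_quest_step get_current_quest_step get_current_quest_step_alt
  rw [show NFTs_sold_steps = NFTs_bought_steps from rfl,
      show NFTs_bid_steps = NFTs_bought_steps from rfl,
      scan_nft, scan_nft, scan_nft, scan_srv]
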